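-- pv_equiv track=rewrite | github.com/LoqmanSamani/bioinformatic | reference_data_indexing.py | make_hash_table
-- ===== SOURCE A (Python) =====
-- def make_hash_table(data, k):
--     """
--     Create a hash table to index substrings of the reference sequence.
--
--     Args:
--     - data (str): The reference sequence.
--     - k (int): The length of k-mer for indexing.
--
--     Returns:
--     - list: A sorted list of tuples containing k-mers and their positions in the reference sequence.
--
--     This method iterates through the reference sequence and stores each k-mer and its position(s) in the hash table.
--
--     """
--     hash_table = {}
--
--     for i in range(len(data) - k + 1):
--
--         if data[i: i+k] not in hash_table:
--
--             hash_table[data[i: i+k]] = [i]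
--
--         else:
--             hash_table[data[i: i+k]].append(i)
--
--     # Convert the hash table into a sorted list for easy access
--     hash_list = [(key, val) for key, val in hash_table.items()]
--     sorted_hash_list = sorted(hash_list)
--
--     return sorted_hash_list
-- ===== SOURCE B (Python) =====
-- def make_hash_table(data, k):
--     # One pass to list all (k-mer, position) pairs, one sort, then a single
--     # linear scan merging consecutive equal k-mers into position lists.
--     pairs = sorted((data[i:i + k], i) for i in range(len(data) - k + 1))
--     out = []
--     for kmer, pos in pairs:
--         if out and out[-1][0] == kmer:
--             out[-1][1].append(pos)
--         else:
--             out.append((kmer, [pos]))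
--     return out
-- ===== Notes on version B (the rewrite author's own statement) =====
-- stated objective: alternative
-- what changed: Replaces the dict-grouping pass followed by sorting grouped tuples with building all (k-mer, position) pairs, sorting them once, and merging consecutive equal k-mers in a single linear scan.
import Mathlib
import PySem

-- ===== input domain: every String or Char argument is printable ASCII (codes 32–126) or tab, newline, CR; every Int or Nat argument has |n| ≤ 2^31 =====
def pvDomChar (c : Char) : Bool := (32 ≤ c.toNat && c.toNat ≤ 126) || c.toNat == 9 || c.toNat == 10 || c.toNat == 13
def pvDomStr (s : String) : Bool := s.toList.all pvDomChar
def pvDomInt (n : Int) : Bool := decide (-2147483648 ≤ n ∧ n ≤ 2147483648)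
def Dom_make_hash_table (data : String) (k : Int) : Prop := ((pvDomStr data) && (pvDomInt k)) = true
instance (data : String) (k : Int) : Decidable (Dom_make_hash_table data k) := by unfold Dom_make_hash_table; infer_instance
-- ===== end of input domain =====

-- B replaces A's dict-grouping pass + sort of grouped tuples by sorting all (k-mer, position)
-- pairs once and merging consecutive equal k-mers in one linear scan (alternative decomposition).


-- ===== PORT A =====
-- loop: hash_table[data[i:i+k]] gets [i] on first sight, else .append(i); then the
-- (key, val) items list is sorted (Python tuple order: key first, then the list).
def make_hash_table (data : String) (k : Int) : List (String × List Int) :=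
  let d : PySem.Dict String (List Int) :=
    (PySem.List.pyRange 0 ((PySem.Str.len data : Int) - k + 1)).foldl
      (fun d i =>
        if !d.contains (PySem.Str.slice data (some i) (some (i + k))) then
          d.insert (PySem.Str.slice data (some i) (some (i + k))) [i]
        else
          d.modify (PySem.Str.slice data (some i) (some (i + k))) [] (fun v => v ++ [i]))
      PySem.Dict.empty
  PySem.List.sorted2 (d.items.map (fun p => (p.1, p.2))) (fun p => p.1) (fun p => p.2) false

-- ===== PORT B =====
-- the loop body of B: merge a (kmer, pos) pair into the run-list built so far
def pvMergeStep (out : List (String × List Int)) (p : String × Int) : List (String × List Int) :=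
  match out.getLast? with
  | some last =>
      if last.1 == p.1 then out.dropLast ++ [(last.1, last.2 ++ [p.2])]
      else out ++ [(p.1, [p.2])]
  | none => out ++ [(p.1, [p.2])]

def make_hash_table_alt (data : String) (k : Int) : List (String × List Int) :=
  let pairs := (PySem.List.pyRange 0 ((PySem.Str.len data : Int) - k + 1)).map
      (fun i => (PySem.Str.slice data (some i) (some (i + k)), i))
  (PySem.List.sorted2 pairs (fun p => p.1) (fun p => p.2) false).foldl pvMergeStep []

-- ===== PRECONDITION & SPEC =====
def Spec_make_hash_table (data : String) (k : Int) (out : List (String × List Int)) : Prop := out = make_hash_table_alt data k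
instance (data : String) (k : Int) (out : List (String × List Int)) : Decidable (Spec_make_hash_table data k out) := by unfold Spec_make_hash_table; infer_instance

-- ===== CLAIM (what is proved, stated in full; the proofs are below) =====
def Claim_equal_make_hash_table : Prop := ∀ (data : String) (k : Int), Dom_make_hash_table data k → Spec_make_hash_table data k (make_hash_table data k)

-- ===== LEMMAS AND PROOFS =====

-- shared abbreviations for the proof
def pvKm (data : String) (k i : Int) : String := PySem.Str.slice data (some i) (some (i + k))
def pvIdxs (data : String) (k : Int) : List Int := PySem.List.pyRange 0 ((PySem.Str.len data : Int) - k + 1)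
def pvKeys (data : String) (k : Int) : List String :=
  PySem.List.sorted (PySem.List.dedup ((pvIdxs data k).map (pvKm data k))) (fun s => s) false
def pvRun (data : String) (k : Int) (s : String) : List Int :=
  (pvIdxs data k).filter (fun i => pvKm data k i == s)
def pvCanon (data : String) (k : Int) : List (String × List Int) :=
  (pvKeys data k).map (fun s => (s, pvRun data k s))

-- the comparison function sorted2 uses internally
def pvLtb {α κ₁ κ₂ : Type} [LT κ₁] [DecidableLT κ₁] [LT κ₂] [DecidableLT κ₂]
    (k1 : α → κ₁) (k2 : α → κ₂) (a b : α) : Bool :=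
  decide (k1 a < k1 b) || (!decide (k1 b < k1 a) && decide (k2 a < k2 b))

lemma sorted2_eq_foldl {α κ₁ κ₂ : Type} [LT κ₁] [DecidableLT κ₁] [LT κ₂] [DecidableLT κ₂]
    (xs : List α) (k1 : α → κ₁) (k2 : α → κ₂) :
    PySem.List.sorted2 xs k1 k2 false
      = xs.foldl (fun acc x => PySem.List.insertBy (pvLtb k1 k2) x acc) [] := rfl

lemma pairwise_insertBy {α : Type} (before : α → α → Bool)
    (hasym : ∀ a b, before a b = true → before b a = false)
    (htrans : ∀ a b c, before a b = true → before b c = true → before a c = true)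
    (x : α) : ∀ acc : List α, acc.Pairwise (fun a b => before b a = false) →
      (PySem.List.insertBy before x acc).Pairwise (fun a b => before b a = false) := by
  intro acc
  induction acc with
  | nil => intro _; simp [PySem.List.insertBy]
  | cons y ys ih =>
    intro h
    rw [List.pairwise_cons] at h
    obtain ⟨hy, hys⟩ := h
    rw [PySem.List.insertBy]
    by_cases hb : before x y = true
    · rw [if_pos hb]
      refine List.Pairwise.cons ?_ (List.Pairwise.cons hy hys)
      intro z hz
      rcases List.mem_cons.mp hz with rfl | hz
      · exact hasym _ _ hb
      · by_contra hc
        have hzx : before z x = true := by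
          cases hzx : before z x with
          | true => rfl
          | false => exact absurd hzx hc
        have := htrans _ _ _ hzx hb
        rw [hy z hz] at this; exact Bool.false_ne_true this
    · rw [if_neg hb]
      refine List.Pairwise.cons ?_ (ih hys)
      intro z hz
      rcases (PySem.List.mem_insertBy before x z ys).mp hz with rfl | hz
      · exact Bool.not_eq_true _ |>.mp hb
      · exact hy z hz

lemma pairwise_foldl_insertBy {α : Type} (before : α → α → Bool)
    (hasym : ∀ a b, before a b = true → before b a = false)
    (htrans : ∀ a b c, before a b = true → before b c = true → before a c = true) :
    ∀ (xs acc : List α), acc.Pairwise (fun a b => before b a = false) →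
      (xs.foldl (fun acc x => PySem.List.insertBy before x acc) acc).Pairwise
        (fun a b => before b a = false) := by
  intro xs
  induction xs with
  | nil => intro acc h; simpa using h
  | cons x xt ih =>
    intro acc h
    simpa using ih _ (pairwise_insertBy before hasym htrans x acc h)

lemma eq_of_perm_of_pairwise {α : Type} (before : α → α → Bool) :
    ∀ (ys xs : List α), xs.Perm ys →
      xs.Pairwise (fun a b => before b a = false) →
      ys.Pairwise (fun a b => before a b = true) → xs = ys := by
  intro ys
  induction ys with
  | nil => intro xs hp _ _; simpa using hp.eq_nil
  | cons y yt ih =>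
    intro xs hp hx hy
    cases xs with
    | nil => exact absurd hp.symm.eq_nil (by simp)
    | cons x xt =>
      rw [List.pairwise_cons] at hx hy
      have hxy : x = y := by
        have hxm : x ∈ y :: yt := hp.mem_iff.mp (List.mem_cons_self ..)
        rcases List.mem_cons.mp hxm with rfl | hxm
        · rfl
        · have h1 : before y x = true := hy.1 x hxm
          have hym : y ∈ x :: xt := hp.mem_iff.mpr (List.mem_cons_self ..)
          rcases List.mem_cons.mp hym with rfl | hym
          · rfl
          · rw [hx.1 y hym] at h1; exact absurd h1 Bool.false_ne_true
      subst hxy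
      have := ih xt hp.cons_inv hx.2 hy.2
      rw [this]

lemma sorted2_eq_of_perm_of_pairwise_ltb {α κ₁ κ₂ : Type}
    [LT κ₁] [DecidableLT κ₁] [LT κ₂] [DecidableLT κ₂]
    (k1 : α → κ₁) (k2 : α → κ₂)
    (hasym : ∀ a b, pvLtb k1 k2 a b = true → pvLtb k1 k2 b a = false)
    (htrans : ∀ a b c, pvLtb k1 k2 a b = true → pvLtb k1 k2 b c = true → pvLtb k1 k2 a c = true)
    (xs ys : List α) (hperm : ys.Perm xs)
    (hy : ys.Pairwise (fun a b => pvLtb k1 k2 a b = true)) :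
    PySem.List.sorted2 xs k1 k2 false = ys := by
  have hp := PySem.List.sorted2_perm xs k1 k2 false
  rw [sorted2_eq_foldl] at hp ⊢
  exact eq_of_perm_of_pairwise _ _ _ (hp.trans hperm.symm)
    (pairwise_foldl_insertBy _ hasym htrans xs [] (by simp)) hy

-- asymmetry / transitivity of the lexicographic comparison pvLtb
-- the same two facts at the instances the ports elaborate with
lemma ltb_asym_A : ∀ a b : String × List Int,
    pvLtb (fun p : String × List Int => p.1) (fun p => p.2) a b = true →
    pvLtb (fun p : String × List Int => p.1) (fun p => p.2) b a = false := by
  intro a b h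
  simp only [pvLtb, Bool.or_eq_true, Bool.and_eq_true, Bool.not_eq_true', decide_eq_true_eq,
    decide_eq_false_iff_not, Bool.or_eq_false_iff, Bool.and_eq_false_iff, Bool.not_eq_false'] at *
  rcases h with h | ⟨h1, h2⟩
  · exact ⟨lt_asymm h, Or.inl (by simpa using h)⟩
  · exact ⟨h1, Or.inr (by simpa using (lt_asymm h2 : ¬ _ < _))⟩
lemma ltb_trans_A : ∀ a b c : String × List Int,
    pvLtb (fun p : String × List Int => p.1) (fun p => p.2) a b = true →
    pvLtb (fun p : String × List Int => p.1) (fun p => p.2) b c = true →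
    pvLtb (fun p : String × List Int => p.1) (fun p => p.2) a c = true := by
  intro a b c hab hbc
  simp only [pvLtb, Bool.or_eq_true, Bool.and_eq_true, Bool.not_eq_true', decide_eq_true_eq,
    decide_eq_false_iff_not] at *
  rcases hab with hab | ⟨hab1, hab2⟩
  · rcases hbc with hbc | ⟨hbc1, hbc2⟩
    · exact Or.inl (lt_trans hab hbc)
    · exact Or.inl (lt_of_lt_of_le hab (le_of_not_gt hbc1))
  · rcases hbc with hbc | ⟨hbc1, hbc2⟩
    · exact Or.inl (lt_of_le_of_lt (le_of_not_gt hab1) hbc)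
    · exact Or.inr ⟨fun h => hab1 (lt_of_le_of_lt (le_of_not_gt hbc1) h), lt_trans hab2 hbc2⟩
lemma ltb_asym_B : ∀ a b : String × Int,
    pvLtb (fun p : String × Int => p.1) (fun p => p.2) a b = true →
    pvLtb (fun p : String × Int => p.1) (fun p => p.2) b a = false := by
  intro a b h
  simp only [pvLtb, Bool.or_eq_true, Bool.and_eq_true, Bool.not_eq_true', decide_eq_true_eq,
    decide_eq_false_iff_not, Bool.or_eq_false_iff, Bool.and_eq_false_iff, Bool.not_eq_false'] at *
  rcases h with h | ⟨h1, h2⟩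
  · exact ⟨lt_asymm h, Or.inl (by simpa using h)⟩
  · exact ⟨h1, Or.inr (by simpa using (lt_asymm h2 : ¬ _ < _))⟩
lemma ltb_trans_B : ∀ a b c : String × Int,
    pvLtb (fun p : String × Int => p.1) (fun p => p.2) a b = true →
    pvLtb (fun p : String × Int => p.1) (fun p => p.2) b c = true →
    pvLtb (fun p : String × Int => p.1) (fun p => p.2) a c = true := by
  intro a b c hab hbc
  simp only [pvLtb, Bool.or_eq_true, Bool.and_eq_true, Bool.not_eq_true', decide_eq_true_eq,
    decide_eq_false_iff_not] at *
  rcases hab with hab | ⟨hab1, hab2⟩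
  · rcases hbc with hbc | ⟨hbc1, hbc2⟩
    · exact Or.inl (lt_trans hab hbc)
    · exact Or.inl (lt_of_lt_of_le hab (le_of_not_gt hbc1))
  · rcases hbc with hbc | ⟨hbc1, hbc2⟩
    · exact Or.inl (lt_of_le_of_lt (le_of_not_gt hab1) hbc)
    · exact Or.inr ⟨fun h => hab1 (lt_of_le_of_lt (le_of_not_gt hbc1) h), lt_trans hab2 hbc2⟩

-- basic facts about the shared pieces
lemma pyRange_pairwise (n : Int) : (PySem.List.pyRange 0 n).Pairwise (· < ·) := by
  rcases le_or_gt 0 n with h | h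
  · obtain ⟨m, rfl⟩ := Int.eq_ofNat_of_zero_le h
    rw [PySem.List.pyRange_zero_natCast]
    exact List.pairwise_lt_range.map _ (by intro a b hab; exact_mod_cast hab)
  · have : PySem.List.pyRange 0 n = [] := by
      simp only [PySem.List.pyRange]
      rw [if_neg (by omega)]
      simp [show ¬ (0:Int) < n by omega]
    rw [this]; exact List.Pairwise.nil

lemma idxs_pairwise (data : String) (k : Int) : (pvIdxs data k).Pairwise (· < ·) :=
  pyRange_pairwise _

lemma keys_pairwise (data : String) (k : Int) : (pvKeys data k).Pairwise (· < ·) := by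
  rw [pvKeys, PySem.List.dedup_eq_ofList]
  exact PySem.List.sorted_ofList_pairwise_lt _

lemma keys_perm_dedup (data : String) (k : Int) :
    (pvKeys data k).Perm (PySem.List.dedup ((pvIdxs data k).map (pvKm data k))) :=
  PySem.List.sorted_perm _ _ _

lemma run_ne_nil (data : String) (k : Int) (s : String) (hs : s ∈ pvKeys data k) :
    pvRun data k s ≠ [] := by
  rw [pvKeys, PySem.List.mem_sorted, PySem.List.mem_dedup, List.mem_map] at hs
  obtain ⟨i, hi, rfl⟩ := hs
  have : i ∈ pvRun data k (pvKm data k i) := by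
    rw [pvRun, List.mem_filter]; exact ⟨hi, by simp⟩
  exact List.ne_nil_of_mem this

-- grouping a list by a nodup key set is a permutation of the list
lemma flatMap_filter_perm {α κ : Type} [BEq κ] [LawfulBEq κ] (g : α → κ) :
    ∀ (ks : List κ) (l : List α), ks.Nodup → (∀ x ∈ l, g x ∈ ks) →
      (ks.flatMap (fun s => l.filter (fun x => g x == s))).Perm l := by
  intro ks
  induction ks with
  | nil =>
    intro l _ hcov
    cases l with
    | nil => simp
    | cons x xt => exact absurd (hcov x (List.mem_cons_self ..)) (by simp)
  | cons s ks ih =>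
    intro l hnd hcov
    rw [List.flatMap_cons]
    rw [List.nodup_cons] at hnd
    have hrw : ks.flatMap (fun s' => l.filter (fun x => g x == s'))
        = ks.flatMap (fun s' => (l.filter (fun x => !(g x == s))).filter (fun x => g x == s')) := by
      apply List.flatMap_congr
      intro s' hs'
      rw [List.filter_filter]
      apply List.filter_congr
      intro a _
      have hne : s' ≠ s := fun hss => hnd.1 (hss ▸ hs')
      by_cases hga : g a = s'
      · simp [hga, hne]
      · simp [hga]
    rw [hrw]
    have hperm2 : (ks.flatMap (fun s' =>
        (l.filter (fun x => !(g x == s))).filter (fun x => g x == s'))).Perm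
        (l.filter (fun x => !(g x == s))) := by
      apply ih _ hnd.2
      intro x hx
      rw [List.mem_filter] at hx
      have hxs : g x ≠ s := by simpa using hx.2
      rcases List.mem_cons.mp (hcov x hx.1) with h | h
      · exact absurd h hxs
      · exact h
    exact (List.Perm.append_left _ hperm2).trans (List.filter_append_perm _ l)

-- ===== A side =====
lemma A_items (data : String) (k : Int) :
    make_hash_table data k
      = PySem.List.sorted2
          ((PySem.List.dedup ((pvIdxs data k).map (pvKm data k))).map
            (fun s => (s, pvRun data k s)))
          (fun p => p.1) (fun p => p.2) false := by
  rw [make_hash_table]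
  have hfun : (fun (d : PySem.Dict String (List Int)) (i : Int) =>
      if !d.contains (PySem.Str.slice data (some i) (some (i + k))) then
        d.insert (PySem.Str.slice data (some i) (some (i + k))) [i]
      else
        d.modify (PySem.Str.slice data (some i) (some (i + k))) [] (fun v => v ++ [i]))
      = fun d i => d.modify (pvKm data k i) [] (fun v => v ++ [i]) := by
    funext d i
    by_cases h : d.contains (PySem.Str.slice data (some i) (some (i + k)))
    · simp [h, pvKm]
    · rw [Bool.not_eq_true] at h
      simp only [h, Bool.not_false, if_pos, pvKm, PySem.Dict.modify,
        PySem.Dict.getD_of_not_contains _ _ h, List.nil_append]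
  rw [hfun]
  set d := (PySem.List.pyRange 0 ((PySem.Str.len data : Int) - k + 1)).foldl
      (fun d i => d.modify (pvKm data k i) [] (fun v => v ++ [i])) PySem.Dict.empty with hd
  have hkeys : d.keys = PySem.List.dedup ((pvIdxs data k).map (pvKm data k)) := by
    rw [hd, PySem.Dict.keys_foldl_modify_key _ _ _ (fun _ i => fun v => v ++ [i]),
      PySem.List.dedup_eq_ofList]
    rfl
  have hnd : d.keys.Nodup := by
    rw [hkeys, PySem.List.dedup_eq_ofList]
    exact PySem.Set.nodup_ofList _
  have hgetD : ∀ s : String, d.getD s [] = pvRun data k s := by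
    intro s
    rw [hd, show (PySem.List.pyRange 0 ((PySem.Str.len data : Int) - k + 1)).foldl
        (fun d i => d.modify (pvKm data k i) [] (fun v => v ++ [i])) PySem.Dict.empty
      = ((pvIdxs data k).map (fun i => (pvKm data k i, i))).foldl
          (fun d p => d.modify p.1 [] (fun v => v ++ [p.2])) PySem.Dict.empty by
        rw [List.foldl_map]; rfl]
    rw [PySem.Dict.getD_foldl_modify_append, PySem.Dict.getD_empty, List.nil_append,
      List.filter_map, List.map_map, pvRun]
    simp [Function.comp_def]
  have hitems : d.items = (PySem.List.dedup ((pvIdxs data k).map (pvKm data k))).map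
      (fun s => (s, pvRun data k s)) := by
    rw [PySem.Dict.items_eq_map_keys d hnd [], hkeys]
    apply List.map_congr_left
    intro s _
    rw [hgetD]
  rw [hitems]
  congr 1
  simp

lemma canon_pairwise_A (data : String) (k : Int) :
    (pvCanon data k).Pairwise
      (fun a b => pvLtb (fun p : String × List Int => p.1) (fun p => p.2) a b = true) := by
  rw [pvCanon, List.pairwise_map]
  exact (keys_pairwise data k).imp (fun {s s'} h => by simp [pvLtb, h])

lemma A_eq_canon (data : String) (k : Int) : make_hash_table data k = pvCanon data k := by
  rw [A_items]
  exact sorted2_eq_of_perm_of_pairwise_ltb _ _ ltb_asym_A ltb_trans_A _ _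
    ((keys_perm_dedup data k).map _) (canon_pairwise_A data k)

-- ===== B side =====
lemma flat_pairwise (f : String → List Int) (hf : ∀ s, (f s).Pairwise (· < ·)) :
    ∀ ks : List String, ks.Pairwise (· < ·) →
      (ks.flatMap (fun s => (f s).map (fun i => (s, i)))).Pairwise
        (fun a b => pvLtb (fun p : String × Int => p.1) (fun p => p.2) a b = true) := by
  intro ks
  induction ks with
  | nil => simp
  | cons s rest ih =>
    intro h
    rw [List.pairwise_cons] at h
    rw [List.flatMap_cons]
    apply List.pairwise_append.mpr
    refine ⟨?_, ih h.2, ?_⟩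
    · rw [List.pairwise_map]
      exact (hf s).imp (fun {i j} hij => by simp [pvLtb, hij])
    · intro a ha b hb
      obtain ⟨i, _, rfl⟩ := List.mem_map.mp ha
      obtain ⟨s', hs', hb'⟩ := List.mem_flatMap.mp hb
      obtain ⟨j, _, rfl⟩ := List.mem_map.mp hb'
      have hss : s < s' := h.1 s' hs'
      simp [pvLtb, hss]

lemma B_sorted_pairs (data : String) (k : Int) :
    PySem.List.sorted2
        ((pvIdxs data k).map (fun i => (pvKm data k i, i)))
        (fun p => p.1) (fun p => p.2) false
      = (pvKeys data k).flatMap (fun s => (pvRun data k s).map (fun i => (s, i))) := by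
  apply sorted2_eq_of_perm_of_pairwise_ltb _ _ ltb_asym_B ltb_trans_B
  · -- the grouped list is a permutation of the pair list
    have h1 : (pvKeys data k).flatMap (fun s => (pvRun data k s).map (fun i => (s, i)))
        = (pvKeys data k).flatMap (fun s =>
            ((pvIdxs data k).map (fun i => (pvKm data k i, i))).filter (fun p => p.1 == s)) := by
      apply List.flatMap_congr
      intro s _
      rw [List.filter_map, pvRun]
      have : ((fun p : String × Int => p.1 == s) ∘ fun i => (pvKm data k i, i))
          = fun i => pvKm data k i == s := rfl
      rw [this]
      apply List.map_congr_left
      intro i hi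
      have : pvKm data k i = s := by simpa using (List.mem_filter.mp hi).2
      rw [this]
    rw [h1]
    apply flatMap_filter_perm (fun p : String × Int => p.1)
    · exact (keys_pairwise data k).imp (fun {a b} h => ne_of_lt h)
    · intro p hp
      obtain ⟨i, hi, rfl⟩ := List.mem_map.mp hp
      rw [pvKeys, PySem.List.mem_sorted, PySem.List.mem_dedup]
      exact List.mem_map.mpr ⟨i, hi, rfl⟩
  · exact flat_pairwise _ (fun s => (idxs_pairwise data k).filter _) _ (keys_pairwise data k)

lemma foldl_merge_run (s : String) :
    ∀ (qs : List Int) (front : List (String × List Int)) (ps : List Int),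
      ((qs.map (fun i => (s, i))).foldl pvMergeStep (front ++ [(s, ps)]))
        = front ++ [(s, ps ++ qs)] := by
  intro qs
  induction qs with
  | nil => intro front ps; simp
  | cons q qt ih =>
    intro front ps
    rw [List.map_cons, List.foldl_cons]
    have hstep : pvMergeStep (front ++ [(s, ps)]) (s, q) = front ++ [(s, ps ++ [q])] := by
      simp [pvMergeStep]
    rw [hstep, ih]
    simp

lemma foldl_merge_runs (f : String → List Int) :
    ∀ (ks : List String), ks.Pairwise (· ≠ ·) → (∀ s ∈ ks, f s ≠ []) →
      ∀ front : List (String × List Int), (∀ q ∈ front.getLast?, q.1 ∉ ks) →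
        ((ks.flatMap (fun s => (f s).map (fun i => (s, i)))).foldl pvMergeStep front)
          = front ++ ks.map (fun s => (s, f s)) := by
  intro ks
  induction ks with
  | nil => intro _ _ front _; simp
  | cons s rest ih =>
    intro hpw hne front hfront
    rw [List.pairwise_cons] at hpw
    cases hq : f s with
    | nil => exact absurd hq (hne s (List.mem_cons_self ..))
    | cons q qt =>
      rw [List.flatMap_cons, List.foldl_append, hq, List.map_cons, List.foldl_cons]
      have hstep : pvMergeStep front (s, q) = front ++ [(s, [q])] := by
        rw [pvMergeStep]
        cases hgl : front.getLast? with
        | none => rfl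
        | some last =>
          have : last.1 ≠ s := by
            intro hls
            exact (hfront last (by rw [hgl]; exact Option.mem_some_self _))
              (hls ▸ List.mem_cons_self ..)
          simp [this]
      rw [hstep, foldl_merge_run]
      have hfs : [q] ++ qt = f s := by rw [hq]; rfl
      rw [hfs, ih hpw.2 (fun s' hs' => hne s' (List.mem_cons_of_mem _ hs'))]
      · simp
      · intro p hp
        rw [List.getLast?_concat] at hp
        have : p = (s, f s) := by simpa using hp.symm
        rw [this]
        exact fun hs' => hpw.1 _ hs' rfl

lemma B_eq_canon (data : String) (k : Int) : make_hash_table_alt data k = pvCanon data k := by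
  have h0 : make_hash_table_alt data k
      = (PySem.List.sorted2 ((pvIdxs data k).map (fun i => (pvKm data k i, i)))
          (fun p => p.1) (fun p => p.2) false).foldl pvMergeStep [] := rfl
  rw [h0, B_sorted_pairs,
    foldl_merge_runs (pvRun data k) (pvKeys data k)
      ((keys_pairwise data k).imp (fun {a b} h => ne_of_lt h))
      (run_ne_nil data k) [] (by simp)]
  rfl

-- ===== VERDICT (by name: the statement is the Claim_ definition above) =====
theorem make_hash_table_spec : Claim_equal_make_hash_table := by
  intro data k _
  unfold Spec_make_hash_table
  rw [A_eq_canon, B_eq_canon]
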